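-- pv_equiv track=rewrite | github.com/dtomic28/Sandbox | Python/pouk_5_11NPR.py | aliJePravilen
-- ===== SOURCE A (Python) =====
-- def aliJePravilen(niz, c=0): #definiramo podmetodo ali je pravilen z vhodno spremenljivko niz in spremenljivko c ki bo stela koliko je enic
--     if len(niz) == 1: #Nastavimo robni stavek, ki pogleda če je samo en znak
--         if niz == "1": #če je pogledamo če je enica
--             c += 1 #če je prištejemo 1
--         if c%2==1 and niz == "0" or c%2==0 and niz == "1": #pogledamo če je bit pravilen
--             return True #vrnemo true če je
--         else: #v obratnem primeru
--             return False #vrnemo da je false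
--     else: #če ni še robni stavek
--         if niz[0] == "1": #pogledamo, če je prvi znak niza 1
--             c += 1 #če je prištejemo 1
--         return aliJePravilen(niz[1:], c = c) #pokličemo rekurzijo naprej
-- ===== SOURCE B (Python) =====
-- def aliJePravilen(niz, c=0):
--     t = c
--     for ch in niz:
--         if ch == "1":
--             t += 1
--     last = niz[-1]
--     return (last == "1" and t % 2 == 0) or (last == "0" and t % 2 == 1)
-- ===== Notes on version B (the rewrite author's own statement) =====
-- stated objective: faster
-- what changed: Replaces the recursion that re-slices the string at every step with a single iterative pass summing the ones into c's parity plus a direct check of the last character.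
import Mathlib
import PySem

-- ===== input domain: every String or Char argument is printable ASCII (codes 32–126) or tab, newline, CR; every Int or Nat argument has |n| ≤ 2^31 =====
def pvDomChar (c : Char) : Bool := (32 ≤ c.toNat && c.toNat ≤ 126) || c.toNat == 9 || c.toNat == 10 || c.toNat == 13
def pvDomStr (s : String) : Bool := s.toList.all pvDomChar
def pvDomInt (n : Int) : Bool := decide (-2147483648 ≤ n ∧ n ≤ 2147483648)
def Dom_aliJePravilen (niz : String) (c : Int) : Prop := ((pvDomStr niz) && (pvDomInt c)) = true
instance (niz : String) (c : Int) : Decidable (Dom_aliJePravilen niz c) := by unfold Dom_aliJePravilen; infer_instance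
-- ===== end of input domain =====

-- B replaces A's recursion (which copies niz[1:] at every step) by one linear pass
-- counting ones plus a direct last-character check; measured asymptotically faster.

-- ===== PORT A =====
-- A recurses on the string: if len == 1 decide from the parity accumulator, else
-- bump the accumulator for a leading '1' and recurse on niz[1:].
def aliJePravilenGo (l : List Char) (c : Int) : Bool :=
  match l with
  | [] => false            -- unreachable: A raises IndexError on the empty string (outside Pre_)
  | [x] =>
      let c := if x = '1' then c + 1 else c
      (PySem.Int.mod c 2 == 1 && x == '0') || (PySem.Int.mod c 2 == 0 && x == '1')
  | x :: y :: rest =>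
      let c := if x = '1' then c + 1 else c
      aliJePravilenGo (y :: rest) c

def aliJePravilen (niz : String) (c : Int) : Bool :=
  aliJePravilenGo niz.toList c

-- ===== PORT B =====
def aliJePravilen_alt (niz : String) (c : Int) : Bool :=
  let t := niz.toList.foldl (fun acc ch => if ch == '1' then acc + 1 else acc) c
  match PySem.Str.pyGet? niz (-1) with
  | none => false          -- unreachable: B raises IndexError on the empty string (outside Pre_)
  | some last =>
      (last == '1' && PySem.Int.mod t 2 == 0) || (last == '0' && PySem.Int.mod t 2 == 1)

-- ===== PRECONDITION & SPEC =====
-- Pre_ excludes only the empty string, on which both A and B raise IndexError.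
def Pre_aliJePravilen (niz : String) (c : Int) : Prop := niz ≠ ""
instance (niz : String) (c : Int) : Decidable (Pre_aliJePravilen niz c) := by unfold Pre_aliJePravilen; infer_instance
def pvWitness_aliJePravilen : String × Int := ("1010", 0)

def Spec_aliJePravilen (niz : String) (c : Int) (out : Bool) : Prop := out = aliJePravilen_alt niz c
instance (niz : String) (c : Int) (out : Bool) : Decidable (Spec_aliJePravilen niz c out) := by unfold Spec_aliJePravilen; infer_instance

-- ===== CLAIM (what is proved, stated in full; the proofs are below) =====
def Claim_equal_aliJePravilen : Prop := ∀ (niz : String) (c : Int), Dom_aliJePravilen niz c → Pre_aliJePravilen niz c → Spec_aliJePravilen niz c (aliJePravilen niz c)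

-- ===== LEMMAS AND PROOFS =====

-- B's result expressed directly on the character list.
def altList (l : List Char) (c : Int) : Bool :=
  let t := c + (l.count '1' : Int)
  match l.getLast? with
  | none => false
  | some last =>
      (last == '1' && PySem.Int.mod t 2 == 0) || (last == '0' && PySem.Int.mod t 2 == 1)

lemma alt_eq_altList (niz : String) (c : Int) :
    aliJePravilen_alt niz c = altList niz.toList c := by
  unfold aliJePravilen_alt altList
  rw [PySem.List.foldl_beq_add_one]
  simp [PySem.List.pyGet?_neg_one]

lemma go_eq_altList : ∀ (l : List Char) (x : Char) (c : Int),
    aliJePravilenGo (x :: l) c = altList (x :: l) c := by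
  intro l
  induction l with
  | nil =>
      intro x c
      unfold aliJePravilenGo altList
      by_cases hx : x = '1' <;> simp [hx, Bool.and_comm, Bool.or_comm]
  | cons y l ih =>
      intro x c
      show aliJePravilenGo (y :: l) (if x = '1' then c + 1 else c) = _
      rw [ih]
      unfold altList
      by_cases hx : x = '1' <;>
        simp [hx, List.count_cons] <;> ring_nf

theorem aliJePravilen_spec : Claim_equal_aliJePravilen := by
  intro niz c _ hpre
  unfold Spec_aliJePravilen aliJePravilen
  rw [alt_eq_altList]
  rcases h : niz.toList with _ | ⟨x, l⟩
  · exact absurd (by simpa using congrArg String.ofList h) hpre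
  · exact go_eq_altList l x c
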